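-- pv_equiv track=rewrite | github.com/Pruthwik/word2number-convertor | text_update_with_word_to_number_conversion.py | find_consecutive_indexes_and_determine_numeric_value
-- ===== SOURCE A (Python) =====
-- def find_consecutive_indexes_and_determine_numeric_value(indexes, numbers):
--     """Find consecutive indexes of numbers in words in a sentence and determine its final numeric value."""
--     consecutive_indexes = [indexes[0]]
--     final_numbers = list()
--     select_indexes = [0]
--     for i in range(len(indexes) - 1):
--         if indexes[i + 1] - indexes[i] == 1:
--             consecutive_indexes.append(indexes[i + 1])
--             select_indexes.append(i + 1)
--         else:
--             if len(consecutive_indexes) == 1: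
--                 final_numbers.append((consecutive_indexes[-1], numbers[i], 1))
--                 select_indexes = [i + 1]
--             else:
--                 intermediate_numbers = list()
--                 for j in range(select_indexes[0], select_indexes[0] + len(consecutive_indexes)):
--                     if numbers[j] == 0:
--                         intermediate_numbers.append(numbers[j])
--                     elif (numbers[j] in range(1, 10) or numbers[j] in range(11, 20)) and numbers[j + 1] % 100 == 0:
--                         intermediate_numbers.append(numbers[j] * numbers[j + 1])
--                     elif numbers[j] in [20, 30, 40, 50, 60, 70, 80, 90] and numbers[j + 1] in range(1, 10):
--                         intermediate_numbers.append(numbers[j] + numbers[j + 1])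
--                     elif (numbers[j] in range(1, 19) or numbers[j] in [20, 30, 40, 50, 60, 70, 80, 90]) and (numbers[j - 1] % 100 == 0):
--                         intermediate_numbers.append(numbers[j])
--                 final_number = sum(intermediate_numbers)
--                 final_numbers.append((consecutive_indexes[0], final_number, len(consecutive_indexes)))
--             consecutive_indexes = [indexes[i + 1]]
--             select_indexes = [i + 1]
--     if not final_numbers and len(consecutive_indexes) == 1:
--         final_numbers.append((consecutive_indexes[-1], numbers[-1], 1))
--     elif final_numbers and final_numbers[-1][0] != consecutive_indexes[-1] and len(consecutive_indexes) == 1: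
--         final_numbers.append((consecutive_indexes[-1], numbers[-1], 1))
--     else:
--         intermediate_numbers = list()
--         for j in range(select_indexes[0], select_indexes[0] + len(consecutive_indexes)):
--             if numbers[j] == 0:
--                 intermediate_numbers.append(numbers[j])
--             elif j < len(numbers) - 1 and (numbers[j] in range(1, 10) or numbers[j] in range(11, 20)) and numbers[j + 1] % 100 == 0:
--                 intermediate_numbers.append(numbers[j] * numbers[j + 1])
--             elif j < len(numbers) - 1 and numbers[j] in [20, 30, 40, 50, 60, 70, 80, 90] and numbers[j + 1] in range(1, 10):
--                 intermediate_numbers.append(numbers[j] + numbers[j + 1])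
--             elif (numbers[j] in range(1, 19) or numbers[j] in [20, 30, 40, 50, 60, 70, 80, 90]) and (numbers[j - 1] % 100 == 0):
--                 intermediate_numbers.append(numbers[j])
--         final_number = sum(intermediate_numbers)
--         final_numbers.append((consecutive_indexes[0], final_number, len(consecutive_indexes)))
--     return final_numbers
-- ===== SOURCE B (Python) =====
-- def find_consecutive_indexes_and_determine_numeric_value(indexes, numbers):
--     """Staged rewrite: per-position value table + prefix sums + offset-key run boundaries."""
--     n = len(indexes)
--     vals = [word_value(numbers, j) for j in range(n)]
--     pre = [0]
--     for v in vals: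
--         pre.append(pre[-1] + v)
--     # positions p, p-1 lie in the same maximal consecutive run iff indexes[p] - p == indexes[p-1] - (p-1)
--     starts = [p for p in range(n) if p == 0 or indexes[p] - p != indexes[p - 1] - (p - 1)]
--     result = []
--     for k in range(len(starts)):
--         start = starts[k]
--         end = starts[k + 1] if k + 1 < len(starts) else n
--         length = end - start
--         if k + 1 < len(starts):
--             if length == 1:
--                 result.append((indexes[start], numbers[start], 1))
--             else:
--                 result.append((indexes[start], pre[end] - pre[start], length))
--         else:
--             if length == 1 and (not result or result[-1][0] != indexes[start]):
--                 result.append((indexes[start], numbers[-1], 1))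
--             else:
--                 result.append((indexes[start], pre[end] - pre[start], length))
--     return result
--
--
-- def word_value(numbers, j):
--     nj = numbers[j]
--     if nj == 0:
--         return 0
--     if j < len(numbers) - 1 and (1 <= nj <= 9 or 11 <= nj <= 19) and numbers[j + 1] % 100 == 0:
--         return nj * numbers[j + 1]
--     if j < len(numbers) - 1 and nj in (20, 30, 40, 50, 60, 70, 80, 90) and 1 <= numbers[j + 1] <= 9:
--         return nj + numbers[j + 1]
--     if (1 <= nj <= 18 or nj in (20, 30, 40, 50, 60, 70, 80, 90)) and numbers[j - 1] % 100 == 0: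
--         return nj
--     return 0
-- ===== Notes on version B (the rewrite author's own statement) =====
-- stated objective: alternative
-- what changed: Replaces A's single online pass with mutable group state (three parallel lists, per-run inner rescans, duplicated trailing block) by staged passes: a per-position value table, its prefix-sum array so each run's value is one subtraction pre[end]-pre[start] instead of an inner loop, and run boundaries found by the offset-key trick (positions are in the same run iff indexes[p]-p is constant).
-- outside the precondition, e.g. on find_consecutive_indexes_and_determine_numeric_value([0, 2], [5]): A returns [(0, 5, 1), (2, 5, 1)], B raises IndexError
import Mathlib
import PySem

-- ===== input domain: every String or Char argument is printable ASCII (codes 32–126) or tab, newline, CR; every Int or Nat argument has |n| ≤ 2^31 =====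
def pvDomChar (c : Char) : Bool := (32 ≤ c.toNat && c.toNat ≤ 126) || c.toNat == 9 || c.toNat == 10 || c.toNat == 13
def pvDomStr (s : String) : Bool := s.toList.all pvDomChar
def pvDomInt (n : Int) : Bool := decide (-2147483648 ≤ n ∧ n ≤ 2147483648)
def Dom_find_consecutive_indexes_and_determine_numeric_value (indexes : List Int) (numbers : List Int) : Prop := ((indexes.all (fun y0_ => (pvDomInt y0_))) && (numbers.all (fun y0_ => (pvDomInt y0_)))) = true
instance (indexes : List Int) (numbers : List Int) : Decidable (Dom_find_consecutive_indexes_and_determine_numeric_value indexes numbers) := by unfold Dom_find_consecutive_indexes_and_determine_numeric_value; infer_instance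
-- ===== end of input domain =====

-- B re-implements A by staged passes: a per-position value table, its prefix sums (one subtraction
-- per run instead of an inner rescan), and run boundaries found by the offset-key trick
-- (indexes[p]-p constant on a run); objective: alternative algorithm, same cost.

-- ===== PORT A =====
-- the four-case body of A's inner loop inside the `for i` loop (no bounds guards)
def pvA_case (numbers : List Int) (acc : List Int) (j : Int) : List Int :=
  if (PySem.List.pyGetD numbers j 0) = 0 then acc ++ [(PySem.List.pyGetD numbers j 0)]
  else if ((1 ≤ (PySem.List.pyGetD numbers j 0) ∧ (PySem.List.pyGetD numbers j 0) ≤ 9) ∨ (11 ≤ (PySem.List.pyGetD numbers j 0) ∧ (PySem.List.pyGetD numbers j 0) ≤ 19)) ∧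
      PySem.Int.mod (PySem.List.pyGetD numbers (j + 1) 0) 100 = 0 then
    acc ++ [(PySem.List.pyGetD numbers j 0) * PySem.List.pyGetD numbers (j + 1) 0]
  else if (PySem.List.pyGetD numbers j 0) ∈ ([20, 30, 40, 50, 60, 70, 80, 90] : List Int) ∧
      (1 ≤ PySem.List.pyGetD numbers (j + 1) 0 ∧ PySem.List.pyGetD numbers (j + 1) 0 ≤ 9) then
    acc ++ [(PySem.List.pyGetD numbers j 0) + PySem.List.pyGetD numbers (j + 1) 0]
  else if ((1 ≤ (PySem.List.pyGetD numbers j 0) ∧ (PySem.List.pyGetD numbers j 0) ≤ 18) ∨ (PySem.List.pyGetD numbers j 0) ∈ ([20, 30, 40, 50, 60, 70, 80, 90] : List Int)) ∧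
      PySem.Int.mod (PySem.List.pyGetD numbers (j - 1) 0) 100 = 0 then
    acc ++ [(PySem.List.pyGetD numbers j 0)]
  else acc

-- the four-case body of A's trailing loop (with the `j < len(numbers) - 1` guards)
def pvA_caseLast (numbers : List Int) (acc : List Int) (j : Int) : List Int :=
  if (PySem.List.pyGetD numbers j 0) = 0 then acc ++ [(PySem.List.pyGetD numbers j 0)]
  else if (j < (numbers.length : Int) - 1) ∧ (((1 ≤ (PySem.List.pyGetD numbers j 0) ∧ (PySem.List.pyGetD numbers j 0) ≤ 9) ∨ (11 ≤ (PySem.List.pyGetD numbers j 0) ∧ (PySem.List.pyGetD numbers j 0) ≤ 19)) ∧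
      PySem.Int.mod (PySem.List.pyGetD numbers (j + 1) 0) 100 = 0) then
    acc ++ [(PySem.List.pyGetD numbers j 0) * PySem.List.pyGetD numbers (j + 1) 0]
  else if (j < (numbers.length : Int) - 1) ∧ ((PySem.List.pyGetD numbers j 0) ∈ ([20, 30, 40, 50, 60, 70, 80, 90] : List Int) ∧
      (1 ≤ PySem.List.pyGetD numbers (j + 1) 0 ∧ PySem.List.pyGetD numbers (j + 1) 0 ≤ 9)) then
    acc ++ [(PySem.List.pyGetD numbers j 0) + PySem.List.pyGetD numbers (j + 1) 0]
  else if ((1 ≤ (PySem.List.pyGetD numbers j 0) ∧ (PySem.List.pyGetD numbers j 0) ≤ 18) ∨ (PySem.List.pyGetD numbers j 0) ∈ ([20, 30, 40, 50, 60, 70, 80, 90] : List Int)) ∧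
      PySem.Int.mod (PySem.List.pyGetD numbers (j - 1) 0) 100 = 0 then
    acc ++ [(PySem.List.pyGetD numbers j 0)]
  else acc

-- body of A's `for i in range(len(indexes) - 1)` loop; state = (consecutive_indexes, final_numbers, select_indexes)
def pvA_step (indexes numbers : List Int)
    (st : List Int × List (Int × Int × Int) × List Int) (i : Int) :
    List Int × List (Int × Int × Int) × List Int :=
  let cons := st.1; let final := st.2.1; let select := st.2.2
  if PySem.List.pyGetD indexes (i + 1) 0 - PySem.List.pyGetD indexes i 0 = 1 then
    (cons ++ [PySem.List.pyGetD indexes (i + 1) 0], final, select ++ [i + 1])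
  else if cons.length = 1 then
    ([PySem.List.pyGetD indexes (i + 1) 0],
     final ++ [(PySem.List.pyGetD cons (-1) 0, PySem.List.pyGetD numbers i 0, 1)], [i + 1])
  else
    let s := PySem.List.pyGetD select 0 0
    let inter := (PySem.List.pyRange s (s + (cons.length : Int)) 1).foldl (pvA_case numbers) []
    ([PySem.List.pyGetD indexes (i + 1) 0],
     final ++ [(PySem.List.pyGetD cons 0 0, inter.sum, (cons.length : Int))], [i + 1])

-- A's trailing if/elif/else block
def pvA_trailer (numbers : List Int)
    (st : List Int × List (Int × Int × Int) × List Int) : List (Int × Int × Int) :=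
  let cons := st.1; let final := st.2.1; let select := st.2.2
  if final = [] ∧ cons.length = 1 then
    final ++ [(PySem.List.pyGetD cons (-1) 0, PySem.List.pyGetD numbers (-1) 0, 1)]
  else if final ≠ [] ∧ (PySem.List.pyGetD final (-1) (0, 0, 0)).1 ≠ PySem.List.pyGetD cons (-1) 0 ∧
      cons.length = 1 then
    final ++ [(PySem.List.pyGetD cons (-1) 0, PySem.List.pyGetD numbers (-1) 0, 1)]
  else
    let s := PySem.List.pyGetD select 0 0
    let inter := (PySem.List.pyRange s (s + (cons.length : Int)) 1).foldl (pvA_caseLast numbers) []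
    final ++ [(PySem.List.pyGetD cons 0 0, inter.sum, (cons.length : Int))]

def find_consecutive_indexes_and_determine_numeric_value (indexes : List Int) (numbers : List Int) : List (Int × Int × Int) :=
  let st := (PySem.List.pyRange 0 ((indexes.length : Int) - 1) 1).foldl (pvA_step indexes numbers)
      ([PySem.List.pyGetD indexes 0 0], ([] : List (Int × Int × Int)), ([0] : List Int))
  pvA_trailer numbers st

-- ===== PORT B =====
-- word_value in Source B
def pvB_val (numbers : List Int) (j : Int) : Int :=
  if (PySem.List.pyGetD numbers j 0) = 0 then 0
  else if (j < (numbers.length : Int) - 1) ∧ (((1 ≤ (PySem.List.pyGetD numbers j 0) ∧ (PySem.List.pyGetD numbers j 0) ≤ 9) ∨ (11 ≤ (PySem.List.pyGetD numbers j 0) ∧ (PySem.List.pyGetD numbers j 0) ≤ 19)) ∧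
      PySem.Int.mod (PySem.List.pyGetD numbers (j + 1) 0) 100 = 0) then
    (PySem.List.pyGetD numbers j 0) * PySem.List.pyGetD numbers (j + 1) 0
  else if (j < (numbers.length : Int) - 1) ∧ ((PySem.List.pyGetD numbers j 0) ∈ ([20, 30, 40, 50, 60, 70, 80, 90] : List Int) ∧
      (1 ≤ PySem.List.pyGetD numbers (j + 1) 0 ∧ PySem.List.pyGetD numbers (j + 1) 0 ≤ 9)) then
    (PySem.List.pyGetD numbers j 0) + PySem.List.pyGetD numbers (j + 1) 0
  else if ((1 ≤ (PySem.List.pyGetD numbers j 0) ∧ (PySem.List.pyGetD numbers j 0) ≤ 18) ∨ (PySem.List.pyGetD numbers j 0) ∈ ([20, 30, 40, 50, 60, 70, 80, 90] : List Int)) ∧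
      PySem.Int.mod (PySem.List.pyGetD numbers (j - 1) 0) 100 = 0 then
    (PySem.List.pyGetD numbers j 0)
  else 0

-- body of Source B's `for k in range(len(starts))` emission loop
def pvB_body (indexes numbers pre : List Int) (n : Int) (starts : List Int)
    (result : List (Int × Int × Int)) (k : Int) : List (Int × Int × Int) :=
  let start := PySem.List.pyGetD starts k 0
  let endp := if k + 1 < (starts.length : Int) then PySem.List.pyGetD starts (k + 1) 0 else n
  let length := endp - start
  if k + 1 < (starts.length : Int) then
    if length = 1 then
      result ++ [(PySem.List.pyGetD indexes start 0, PySem.List.pyGetD numbers start 0, 1)]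
    else
      result ++ [(PySem.List.pyGetD indexes start 0,
        PySem.List.pyGetD pre endp 0 - PySem.List.pyGetD pre start 0, length)]
  else
    if length = 1 ∧ (result = [] ∨
        (PySem.List.pyGetD result (-1) (0, 0, 0)).1 ≠ PySem.List.pyGetD indexes start 0) then
      result ++ [(PySem.List.pyGetD indexes start 0, PySem.List.pyGetD numbers (-1) 0, 1)]
    else
      result ++ [(PySem.List.pyGetD indexes start 0,
        PySem.List.pyGetD pre endp 0 - PySem.List.pyGetD pre start 0, length)]

def find_consecutive_indexes_and_determine_numeric_value_alt (indexes : List Int) (numbers : List Int) : List (Int × Int × Int) :=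
  let n : Int := (indexes.length : Int)
  let vals : List Int := (PySem.List.pyRange 0 n 1).map (fun j => pvB_val numbers j)
  let pre : List Int := vals.foldl (fun p v => p ++ [PySem.List.pyGetD p (-1) 0 + v]) [0]
  let starts : List Int := (PySem.List.pyRange 0 n 1).foldl
    (fun s p => if p = 0 ∨
        PySem.List.pyGetD indexes p 0 - p ≠ PySem.List.pyGetD indexes (p - 1) 0 - (p - 1) then
      s ++ [p] else s) []
  (PySem.List.pyRange 0 (starts.length : Int) 1).foldl (pvB_body indexes numbers pre n starts) []

-- ===== PRECONDITION & SPEC =====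
-- Pre_ excludes inputs where A raises an IndexError (empty `indexes`) and shapes with `numbers`
-- shorter than `indexes`, where A usually raises too but can accidentally return a value built from
-- misaligned positions thanks to short-circuiting; B's eager value table raises there.
def Pre_find_consecutive_indexes_and_determine_numeric_value (indexes : List Int) (numbers : List Int) : Prop :=
  indexes ≠ [] ∧ indexes.length ≤ numbers.length
instance (indexes : List Int) (numbers : List Int) : Decidable (Pre_find_consecutive_indexes_and_determine_numeric_value indexes numbers) := by
  unfold Pre_find_consecutive_indexes_and_determine_numeric_value; infer_instance

def pvWitness_find_consecutive_indexes_and_determine_numeric_value : List Int × List Int :=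
  ([1, 2, 5], [2, 100, 7])

def Spec_find_consecutive_indexes_and_determine_numeric_value (indexes : List Int) (numbers : List Int) (out : List (Int × Int × Int)) : Prop := out = find_consecutive_indexes_and_determine_numeric_value_alt indexes numbers
instance (indexes : List Int) (numbers : List Int) (out : List (Int × Int × Int)) : Decidable (Spec_find_consecutive_indexes_and_determine_numeric_value indexes numbers out) := by unfold Spec_find_consecutive_indexes_and_determine_numeric_value; infer_instance

-- ===== CLAIM (what is proved, stated in full; the proofs are below) =====
def Claim_equal_find_consecutive_indexes_and_determine_numeric_value : Prop := ∀ (indexes : List Int) (numbers : List Int), Dom_find_consecutive_indexes_and_determine_numeric_value indexes numbers → Pre_find_consecutive_indexes_and_determine_numeric_value indexes numbers → Spec_find_consecutive_indexes_and_determine_numeric_value indexes numbers (find_consecutive_indexes_and_determine_numeric_value indexes numbers)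

-- ===== LEMMAS AND PROOFS =====

-- length of the maximal consecutive run of `indexes` starting at position s
def pvRunLen (idx : List Int) (s : Nat) : Nat :=
  if h : s + 1 < idx.length ∧ idx.getD (s + 1) 0 - idx.getD s 0 = 1 then pvRunLen idx (s + 1) + 1
  else 1
termination_by idx.length - s
decreasing_by omega

-- the run decomposition (startPos, length) of `indexes` from position s on
def pvRunsFrom (idx : List Int) (s : Nat) : List (Int × Int) :=
  if _h : s < idx.length then
    ((s : Int), (pvRunLen idx s : Int)) :: pvRunsFrom idx (s + pvRunLen idx s)
  else []
termination_by idx.length - s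
decreasing_by
  have : 1 ≤ pvRunLen idx s := by
    unfold pvRunLen; split <;> omega
  omega

-- the `consecutive_indexes` list after scanning positions s..i of a run
def pvConsRep (idx : List Int) (s i : Nat) : List Int :=
  (List.range' s (i + 1 - s)).map (fun t => idx.getD t 0)

-- shared run semantics: emit one tuple per run (last run special), value = guarded word-value sum
def pvB_emit (indexes numbers : List Int) (pos length : Int) : Int × Int × Int :=
  if length = 1 then (PySem.List.pyGetD indexes pos 0, PySem.List.pyGetD numbers pos 0, 1)
  else
    let total := (PySem.List.pyRange pos (pos + length) 1).foldl
        (fun t j => t + pvB_val numbers j) 0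
    (PySem.List.pyGetD indexes pos 0, total, length)

def pvB2 (idx num : List Int) (F : List (Int × Int × Int)) (runs : List (Int × Int)) :
    List (Int × Int × Int) :=
  let result := runs.dropLast.foldl
    (fun res (r : Int × Int) => res ++ [pvB_emit idx num r.1 r.2]) F
  let last := PySem.List.pyGetD runs (-1) (0, 0)
  if last.2 = 1 ∧ (result = [] ∨
      (PySem.List.pyGetD result (-1) (0, 0, 0)).1 ≠ PySem.List.pyGetD idx last.1 0) then
    result ++ [(PySem.List.pyGetD idx last.1 0, PySem.List.pyGetD num (-1) 0, 1)]
  else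
    result ++ [(PySem.List.pyGetD idx last.1 0,
      (PySem.List.pyRange last.1 (last.1 + last.2) 1).foldl
        (fun t j => t + pvB_val num j) 0, last.2)]

theorem pvGetD_singleton_neg_one (x d : Int) : PySem.List.pyGetD [x] (-1) d = x := by
  have : ([x] : List Int) = [] ++ [x] := rfl
  rw [this, PySem.List.pyGetD_neg_one_append_singleton]

theorem pvConsRep_self (idx : List Int) (s : Nat) : pvConsRep idx s s = [idx.getD s 0] := by
  simp [pvConsRep]

theorem pvConsRep_length (idx : List Int) (s i : Nat) :
    (pvConsRep idx s i).length = i + 1 - s := by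
  simp [pvConsRep]

theorem pvConsRep_snoc (idx : List Int) (s i : Nat) (h : s ≤ i) :
    pvConsRep idx s (i + 1) = pvConsRep idx s i ++ [idx.getD (i + 1) 0] := by
  unfold pvConsRep
  have h1 : i + 1 + 1 - s = (i + 1 - s) + 1 := by omega
  rw [h1, List.range'_1_concat, List.map_append]
  have h2 : s + (i + 1 - s) = i + 1 := by omega
  rw [h2]
  rfl

theorem pvConsRep_head (idx : List Int) (s i : Nat) (h : s ≤ i) :
    PySem.List.pyGetD (pvConsRep idx s i) 0 0 = idx.getD s 0 := by
  unfold pvConsRep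
  have h1 : i + 1 - s = (i - s) + 1 := by omega
  rw [h1, List.range'_succ, List.map_cons, PySem.List.pyGetD_zero_cons]

theorem pvRunLen_eq (idx : List Int) (s e : Nat) (hse : s ≤ e) (hen : e < idx.length)
    (hrun : ∀ t, s < t → t ≤ e → idx.getD t 0 - idx.getD (t - 1) 0 = 1)
    (hend : e + 1 = idx.length ∨ idx.getD (e + 1) 0 - idx.getD e 0 ≠ 1) :
    pvRunLen idx s = e + 1 - s := by
  have H : ∀ d u, s ≤ u → u ≤ e → e - u = d → pvRunLen idx u = e + 1 - u := by
    intro d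
    induction d with
    | zero =>
      intro u hsu hue hd
      have hue' : u = e := by omega
      subst hue'
      rw [pvRunLen]
      rw [dif_neg]
      · omega
      · rintro ⟨h1, h2⟩
        rcases hend with h | h
        · omega
        · exact h h2
    | succ d ih =>
      intro u hsu hue hd
      have hlt : u < e := by omega
      have hcond : u + 1 < idx.length ∧ idx.getD (u + 1) 0 - idx.getD u 0 = 1 :=
        ⟨by omega, by simpa using hrun (u + 1) (by omega) (by omega)⟩
      rw [pvRunLen, dif_pos hcond]
      have := ih (u + 1) (by omega) (by omega) (by omega)
      omega
  exact H (e - s) s le_rfl hse rfl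

theorem pvRunLen_le (idx : List Int) (s : Nat) (h : s < idx.length) :
    s + pvRunLen idx s ≤ idx.length := by
  have H : ∀ k u, idx.length - u = k → u < idx.length → u + pvRunLen idx u ≤ idx.length := by
    intro k
    induction k with
    | zero => intro u hk hu; omega
    | succ k ih =>
      intro u hk hu
      rw [pvRunLen]
      split
      · next hc =>
        have := ih (u + 1) (by omega) hc.1
        omega
      · omega
  exact H (idx.length - s) s rfl h

theorem pvB2_cons (idx num : List Int) (F : List (Int × Int × Int)) (r : Int × Int)
    (rest : List (Int × Int)) (h : rest ≠ []) :
    pvB2 idx num F (r :: rest)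
      = pvB2 idx num (F ++ [pvB_emit idx num r.1 r.2]) rest := by
  have hlast : PySem.List.pyGetD (r :: rest) (-1) ((0 : Int), (0 : Int))
      = PySem.List.pyGetD rest (-1) ((0 : Int), (0 : Int)) := by
    rw [PySem.List.pyGetD_neg_one (h := List.cons_ne_nil r rest),
        PySem.List.pyGetD_neg_one (h := h), List.getLast_cons h]
  unfold pvB2
  rw [List.dropLast_cons_of_ne_nil h, List.foldl_cons, hlast]

theorem pvB2_singleton (idx num : List Int) (F : List (Int × Int × Int)) (r : Int × Int) :
    pvB2 idx num F [r]
      = if r.2 = 1 ∧ (F = [] ∨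
            (PySem.List.pyGetD F (-1) (0, 0, 0)).1 ≠ PySem.List.pyGetD idx r.1 0) then
          F ++ [(PySem.List.pyGetD idx r.1 0, PySem.List.pyGetD num (-1) 0, 1)]
        else
          F ++ [(PySem.List.pyGetD idx r.1 0,
            (PySem.List.pyRange r.1 (r.1 + r.2) 1).foldl (fun t j => t + pvB_val num j) 0, r.2)] := by
  have hlast : PySem.List.pyGetD [r] (-1) ((0 : Int), (0 : Int)) = r := by
    rw [PySem.List.pyGetD_neg_one (h := List.cons_ne_nil r [])]
    simp
  unfold pvB2
  rw [hlast]
  simp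

theorem pv_caseLast_sum_step (num : List Int) (L : List Int) (j : Int) :
    (pvA_caseLast num L j).sum = L.sum + pvB_val num j := by
  unfold pvA_caseLast pvB_val
  split_ifs <;> simp_all [List.sum_append]

theorem pv_sum_caseLast (num : List Int) (r : List Int) (L : List Int) :
    (r.foldl (pvA_caseLast num) L).sum
      = L.sum + (r.map (pvB_val num)).sum := by
  induction r generalizing L with
  | nil => simp
  | cons a t ih =>
    simp only [List.foldl_cons, List.map_cons, List.sum_cons]
    rw [ih, pv_caseLast_sum_step]
    ring

theorem pv_case_eq_caseLast (num : List Int) (L : List Int) (j : Int)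
    (h : j < (num.length : Int) - 1) :
    pvA_case num L j = pvA_caseLast num L j := by
  simp only [pvA_case, pvA_caseLast, h, true_and]

-- main A-side invariant
theorem pvLA (idx num : List Int) (hlen : idx.length ≤ num.length) :
    ∀ (k s i : Nat) (F : List (Int × Int × Int)) (sel : List Int),
      k = (idx.length - 1) - i → s ≤ i → i ≤ idx.length - 1 → idx ≠ [] →
      (s = 0 ∨ idx.getD s 0 - idx.getD (s - 1) 0 ≠ 1) →
      (∀ t, s < t → t ≤ i → idx.getD t 0 - idx.getD (t - 1) 0 = 1) →
      pvA_trailer num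
        ((PySem.List.pyRange (i : Int) ((idx.length : Int) - 1) 1).foldl (pvA_step idx num)
          (pvConsRep idx s i, F, ((s : Int) :: sel)))
        = pvB2 idx num F (pvRunsFrom idx s) := by
  intro k
  induction k with
  | zero =>
    intro s i F sel hk hsi hin hne hstart hrun
    have hlen1 : 1 ≤ idx.length := List.length_pos_iff.mpr hne
    have hi : i = idx.length - 1 := by omega
    have hcast : ((idx.length : Int) - 1) ≤ (i : Int) := by omega
    rw [PySem.List.pyRange_one_eq_nil hcast, List.foldl_nil]
    have hrl : pvRunLen idx s = idx.length - s := by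
      have := pvRunLen_eq idx s (idx.length - 1) (by omega) (by omega)
        (fun t ht hte => hrun t ht (by omega)) (Or.inl (by omega))
      omega
    have hruns : pvRunsFrom idx s = [((s : Int), ((idx.length - s : Nat) : Int))] := by
      rw [pvRunsFrom, dif_pos (by omega : s < idx.length), hrl, pvRunsFrom, dif_neg (by omega)]
    rw [hruns, pvB2_singleton]
    rw [PySem.List.pyGetD_natCast (xs := idx)]
    have hclen : (pvConsRep idx s i).length = idx.length - s := by
      rw [pvConsRep_length]; omega
    have hElse : (¬ (F = [] ∧ (pvConsRep idx s i).length = 1)) →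
        (¬ (F ≠ [] ∧ (PySem.List.pyGetD F (-1) (0, 0, 0)).1
              ≠ PySem.List.pyGetD (pvConsRep idx s i) (-1) 0 ∧ (pvConsRep idx s i).length = 1)) →
        pvA_trailer num (pvConsRep idx s i, F, ((s : Int) :: sel))
          = F ++ [(idx.getD s 0,
             (PySem.List.pyRange (s : Int) ((s : Int) + ((idx.length - s : Nat) : Int)) 1).foldl
               (fun t j => t + pvB_val num j) 0,
             ((idx.length - s : Nat) : Int))] := by
      intro h1 h2
      unfold pvA_trailer
      dsimp only
      rw [if_neg h1, if_neg h2]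
      rw [hclen, PySem.List.pyGetD_zero_cons, pvConsRep_head idx s i (by omega)]
      congr 1
      congr 1
      rw [pv_sum_caseLast, PySem.List.foldl_add]
      simp
    by_cases hsl : s = idx.length - 1
    · -- final run is a singleton
      have hcons : pvConsRep idx s i = [idx.getD s 0] := by
        rw [hi, ← hsl, pvConsRep_self]
      by_cases hcnd : F = [] ∨ (PySem.List.pyGetD F (-1) (0, 0, 0)).1 ≠ idx.getD s 0
      · rw [if_pos ⟨by omega, hcnd⟩]
        unfold pvA_trailer
        dsimp only
        rcases eq_or_ne F [] with hF | hF
        · rw [if_pos ⟨hF, by rw [hcons]; rfl⟩, hcons, pvGetD_singleton_neg_one, hF]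
        · have hne1 : (PySem.List.pyGetD F (-1) (0, 0, 0)).1 ≠ idx.getD s 0 := by
            rcases hcnd with h | h
            · exact absurd h hF
            · exact h
          rw [if_neg (by rintro ⟨h1, -⟩; exact hF h1)]
          rw [if_pos ⟨hF, by rw [hcons, pvGetD_singleton_neg_one]; exact hne1,
              by rw [hcons]; rfl⟩]
          rw [hcons, pvGetD_singleton_neg_one]
      · push Not at hcnd
        obtain ⟨hF, heq⟩ := hcnd
        rw [if_neg (by rintro ⟨-, h⟩; rcases h with h | h; exact hF h; exact h heq)]
        exact hElse (by rintro ⟨h1, -⟩; exact hF h1)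
          (by rintro ⟨-, h2, -⟩; rw [hcons, pvGetD_singleton_neg_one] at h2; exact h2 heq)
    · -- final run has length ≥ 2
      have hlen2 : 2 ≤ idx.length - s := by omega
      rw [if_neg (by rintro ⟨h, -⟩; omega)]
      exact hElse (by rintro ⟨-, h2⟩; omega) (by rintro ⟨-, -, h3⟩; omega)
  | succ k ih =>
    intro s i F sel hk hsi hin hne hstart hrun
    have hlen1 : 1 ≤ idx.length := List.length_pos_iff.mpr hne
    have hi : i + 1 < idx.length := by omega
    have hcast : (i : Int) < (idx.length : Int) - 1 := by omega
    rw [PySem.List.pyRange_one_cons hcast, List.foldl_cons]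
    have e1 : PySem.List.pyGetD idx ((i : Int) + 1) 0 = idx.getD (i + 1) 0 := by
      have h1 : ((i : Int) + 1) = ((i + 1 : Nat) : Int) := by push_cast; ring
      rw [h1, PySem.List.pyGetD_natCast]
    have e2 : PySem.List.pyGetD idx (i : Int) 0 = idx.getD i 0 := PySem.List.pyGetD_natCast ..
    by_cases hd : idx.getD (i + 1) 0 - idx.getD i 0 = 1
    · -- run continues
      have hstep : pvA_step idx num (pvConsRep idx s i, F, ((s : Int) :: sel)) (i : Int)
          = (pvConsRep idx s (i + 1), F, ((s : Int) :: (sel ++ [(i : Int) + 1]))) := by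
        unfold pvA_step
        dsimp only
        rw [if_pos (by rw [e1, e2]; exact hd), e1, pvConsRep_snoc idx s i hsi]
        rfl
      rw [hstep]
      have hr : (i : Int) + 1 = ((i + 1 : Nat) : Int) := by push_cast; ring
      rw [hr]
      exact ih s (i + 1) F (sel ++ [(i : Int) + 1]) (by omega) (by omega) (by omega) hne hstart
        (fun t ht hte => by
          rcases Nat.lt_or_ge t (i + 1) with h | h
          · exact hrun t ht (by omega)
          · have : t = i + 1 := by omega
            subst this; simpa using hd)
    · -- run breaks at i
      have hruns : pvRunsFrom idx s
          = ((s : Int), ((i + 1 - s : Nat) : Int)) :: pvRunsFrom idx (i + 1) := by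
        have hrl : pvRunLen idx s = i + 1 - s := by
          have := pvRunLen_eq idx s i hsi (by omega) (fun t ht hte => hrun t ht hte)
            (Or.inr (by simpa using hd))
          omega
        rw [pvRunsFrom, dif_pos (by omega : s < idx.length), hrl]
        have : s + (i + 1 - s) = i + 1 := by omega
        rw [this]
      have hrestne : pvRunsFrom idx (i + 1) ≠ [] := by
        rw [pvRunsFrom, dif_pos (by omega : i + 1 < idx.length)]
        simp
      have hr : (i : Int) + 1 = ((i + 1 : Nat) : Int) := by push_cast; ring
      by_cases hsl : s = i
      · -- closing a singleton run
        have hstep : pvA_step idx num (pvConsRep idx s i, F, ((s : Int) :: sel)) (i : Int)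
            = (pvConsRep idx (i + 1) (i + 1),
               F ++ [(idx.getD s 0, num.getD i 0, 1)],
               (((i + 1 : Nat) : Int) :: ([] : List Int))) := by
          unfold pvA_step
          dsimp only
          rw [if_neg (by rw [e1, e2]; exact hd)]
          rw [if_pos (by rw [pvConsRep_length]; omega)]
          subst hsl
          rw [pvConsRep_self, pvGetD_singleton_neg_one, e1, pvConsRep_self,
              PySem.List.pyGetD_natCast, ← hr]
        rw [hstep, hr]
        rw [ih (i + 1) (i + 1) (F ++ [(idx.getD s 0, num.getD i 0, 1)]) [] (by omega) le_rfl
          (by omega) hne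
          (Or.inr (by simpa using hd))
          (fun t ht hte => by omega)]
        rw [hruns, pvB2_cons idx num F _ _ hrestne]
        have hemit : pvB_emit idx num (s : Int) ((i + 1 - s : Nat) : Int)
            = (idx.getD s 0, num.getD i 0, 1) := by
          unfold pvB_emit
          rw [if_pos (by omega : ((i + 1 - s : Nat) : Int) = 1), PySem.List.pyGetD_natCast,
              PySem.List.pyGetD_natCast, hsl]
        rw [hemit]
      · -- closing a run of length ≥ 2
        have hsilt : s < i := by omega
        have hstep : pvA_step idx num (pvConsRep idx s i, F, ((s : Int) :: sel)) (i : Int)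
            = (pvConsRep idx (i + 1) (i + 1),
               F ++ [(idx.getD s 0,
                 ((PySem.List.pyRange (s : Int) ((s : Int) + ((i + 1 - s : Nat) : Int)) 1).foldl
                   (pvA_case num) []).sum,
                 ((i + 1 - s : Nat) : Int))],
               (((i + 1 : Nat) : Int) :: ([] : List Int))) := by
          unfold pvA_step
          dsimp only
          rw [if_neg (by rw [e1, e2]; exact hd)]
          rw [if_neg (by rw [pvConsRep_length]; omega)]
          rw [PySem.List.pyGetD_zero_cons, pvConsRep_length,
              pvConsRep_head idx s i (by omega), e1, pvConsRep_self, ← hr]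
        rw [hstep, hr]
        rw [ih (i + 1) (i + 1)
          (F ++ [(idx.getD s 0,
            ((PySem.List.pyRange (s : Int) ((s : Int) + ((i + 1 - s : Nat) : Int)) 1).foldl
              (pvA_case num) []).sum, ((i + 1 - s : Nat) : Int))]) [] (by omega) le_rfl
          (by omega) hne
          (Or.inr (by simpa using hd))
          (fun t ht hte => by omega)]
        rw [hruns, pvB2_cons idx num F _ _ hrestne]
        have hemit : pvB_emit idx num (s : Int) ((i + 1 - s : Nat) : Int)
            = (idx.getD s 0,
               ((PySem.List.pyRange (s : Int) ((s : Int) + ((i + 1 - s : Nat) : Int)) 1).foldl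
                 (pvA_case num) []).sum,
               ((i + 1 - s : Nat) : Int)) := by
          unfold pvB_emit
          rw [if_neg (by omega : ¬ ((i + 1 - s : Nat) : Int) = 1)]
          dsimp only
          rw [PySem.List.pyGetD_natCast]
          congr 1
          congr 1
          have hAB : (PySem.List.pyRange (s : Int) ((s : Int) + ((i + 1 - s : Nat) : Int)) 1).foldl
                (pvA_case num) ([] : List Int)
              = (PySem.List.pyRange (s : Int) ((s : Int) + ((i + 1 - s : Nat) : Int)) 1).foldl
                (pvA_caseLast num) ([] : List Int) := by
            apply PySem.List.foldl_congr_mem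
            intro acc x hx
            apply pv_case_eq_caseLast
            rcases (PySem.List.mem_pyRange_one).mp hx with ⟨h1, h2⟩
            have hc : ((s : Int) + ((i + 1 - s : Nat) : Int)) = (i : Int) + 1 := by omega
            rw [hc] at h2
            omega
          rw [PySem.List.foldl_add, hAB, pv_sum_caseLast]
          simp
        rw [hemit]

-- ===== B-side lemmas =====

-- prefix-sum list characterisation
theorem pvPre_eq (vs : List Int) :
    vs.foldl (fun p v => p ++ [PySem.List.pyGetD p (-1) 0 + v]) [0]
      = (List.range (vs.length + 1)).map (fun k => (vs.take k).sum) := by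
  induction vs using List.reverseRecOn with
  | nil => simp
  | append_singleton vs v ih =>
    rw [List.foldl_append, ih]
    simp only [List.foldl_cons, List.foldl_nil]
    have hlast : PySem.List.pyGetD
        ((List.range (vs.length + 1)).map (fun k => (vs.take k).sum)) (-1) 0 = vs.sum := by
      rw [List.range_succ, List.map_append]
      simp only [List.map_cons, List.map_nil]
      rw [PySem.List.pyGetD_neg_one_append_singleton]
      simp
    rw [hlast]
    rw [List.length_append, List.length_cons, List.length_nil]
    have h2 : vs.length + 1 + 1 = (vs.length + 1) + 1 := by omega
    rw [h2, List.range_succ (n := vs.length + 1), List.map_append]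
    congr 1
    · apply List.map_congr_left
      intro k hk
      rw [List.mem_range] at hk
      rw [List.take_append_of_le_length (by omega)]
    · simp

-- starts-loop invariant: starts = first components of the run decomposition
theorem pvLS (idx : List Int) :
    ∀ (k s i : Nat) (R : List Int),
      k = (idx.length - 1) - i → s ≤ i → i ≤ idx.length - 1 → idx ≠ [] →
      (∀ t, s < t → t ≤ i → idx.getD t 0 - idx.getD (t - 1) 0 = 1) →
      (PySem.List.pyRange ((i : Int) + 1) (idx.length : Int) 1).foldl
        (fun acc p => if p = 0 ∨
            PySem.List.pyGetD idx p 0 - p ≠ PySem.List.pyGetD idx (p - 1) 0 - (p - 1) then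
          acc ++ [p] else acc)
        (R ++ [(s : Int)])
        = R ++ (pvRunsFrom idx s).map (fun r => r.1) := by
  intro k
  induction k with
  | zero =>
    intro s i R hk hsi hin hne hrun
    have hlen1 : 1 ≤ idx.length := List.length_pos_iff.mpr hne
    have hi : i + 1 = idx.length := by omega
    have hcast : (idx.length : Int) ≤ (i : Int) + 1 := by omega
    rw [PySem.List.pyRange_one_eq_nil hcast, List.foldl_nil]
    have hrl : pvRunLen idx s = idx.length - s := by
      have := pvRunLen_eq idx s (idx.length - 1) (by omega) (by omega)
        (fun t ht hte => hrun t ht (by omega)) (Or.inl (by omega))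
      omega
    rw [pvRunsFrom, dif_pos (by omega : s < idx.length), hrl, pvRunsFrom, dif_neg (by omega)]
    simp
  | succ k ih =>
    intro s i R hk hsi hin hne hrun
    have hlen1 : 1 ≤ idx.length := List.length_pos_iff.mpr hne
    have hi : i + 1 < idx.length := by omega
    have hcast : (i : Int) + 1 < (idx.length : Int) := by omega
    rw [PySem.List.pyRange_one_cons hcast, List.foldl_cons]
    have e1 : PySem.List.pyGetD idx ((i : Int) + 1) 0 = idx.getD (i + 1) 0 := by
      have h1 : ((i : Int) + 1) = ((i + 1 : Nat) : Int) := by push_cast; ring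
      rw [h1, PySem.List.pyGetD_natCast]
    have e2 : PySem.List.pyGetD idx ((i : Int) + 1 - 1) 0 = idx.getD i 0 := by
      have h1 : ((i : Int) + 1 - 1) = ((i : Nat) : Int) := by ring
      rw [h1, PySem.List.pyGetD_natCast]
    by_cases hd : idx.getD (i + 1) 0 - idx.getD i 0 = 1
    · -- same run: nothing appended
      have hcond : ¬ ((i : Int) + 1 = 0 ∨
          PySem.List.pyGetD idx ((i : Int) + 1) 0 - ((i : Int) + 1)
            ≠ PySem.List.pyGetD idx ((i : Int) + 1 - 1) 0 - ((i : Int) + 1 - 1)) := by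
        rw [e1, e2]
        push Not
        constructor
        · omega
        · omega
      rw [if_neg hcond]
      have hr : (i : Int) + 1 = ((i + 1 : Nat) : Int) := by push_cast; ring
      rw [hr]
      exact ih s (i + 1) R (by omega) (by omega) (by omega) hne
        (fun t ht hte => by
          rcases Nat.lt_or_ge t (i + 1) with h | h
          · exact hrun t ht (by omega)
          · have : t = i + 1 := by omega
            subst this; simpa using hd)
    · -- run break: append the new start i+1
      have hcond : ((i : Int) + 1 = 0 ∨
          PySem.List.pyGetD idx ((i : Int) + 1) 0 - ((i : Int) + 1)
            ≠ PySem.List.pyGetD idx ((i : Int) + 1 - 1) 0 - ((i : Int) + 1 - 1)) := by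
        right
        rw [e1, e2]
        omega
      rw [if_pos hcond]
      have hr : (i : Int) + 1 = ((i + 1 : Nat) : Int) := by push_cast; ring
      have hruns : pvRunsFrom idx s
          = ((s : Int), ((i + 1 - s : Nat) : Int)) :: pvRunsFrom idx (i + 1) := by
        have hrl : pvRunLen idx s = i + 1 - s := by
          have := pvRunLen_eq idx s i hsi (by omega) (fun t ht hte => hrun t ht hte)
            (Or.inr (by simpa using hd))
          omega
        rw [pvRunsFrom, dif_pos (by omega : s < idx.length), hrl]
        have : s + (i + 1 - s) = i + 1 := by omega
        rw [this]
      have hassoc : R ++ [(s : Int)] ++ [(i : Int) + 1]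
          = (R ++ [(s : Int)]) ++ [((i + 1 : Nat) : Int)] := by
        rw [hr]
      rw [hassoc, hr]
      rw [ih (i + 1) (i + 1) (R ++ [(s : Int)]) (by omega) le_rfl (by omega) hne
        (fun t ht hte => by omega)]
      rw [hruns]
      simp

-- indexed emission fold = structural recursion over the starts list (with the end sentinel n)
def pvB3 (idx num pre : List Int) (n : Int) (F : List (Int × Int × Int)) :
    List Int → List (Int × Int × Int)
  | [] => F
  | [s] =>
      if n - s = 1 ∧ (F = [] ∨
          (PySem.List.pyGetD F (-1) (0, 0, 0)).1 ≠ PySem.List.pyGetD idx s 0) then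
        F ++ [(PySem.List.pyGetD idx s 0, PySem.List.pyGetD num (-1) 0, 1)]
      else
        F ++ [(PySem.List.pyGetD idx s 0,
          PySem.List.pyGetD pre n 0 - PySem.List.pyGetD pre s 0, n - s)]
  | s :: s' :: rest =>
      pvB3 idx num pre n
        (F ++ [if s' - s = 1 then (PySem.List.pyGetD idx s 0, PySem.List.pyGetD num s 0, 1)
               else (PySem.List.pyGetD idx s 0,
                 PySem.List.pyGetD pre s' 0 - PySem.List.pyGetD pre s 0, s' - s)])
        (s' :: rest)

theorem pvFoldB3 (idx num pre : List Int) (n : Int) (starts : List Int) :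
    ∀ (d k : Nat) (F : List (Int × Int × Int)), starts.length - k = d →
      (PySem.List.pyRange ((k : Nat) : Int) (starts.length : Int) 1).foldl
        (pvB_body idx num pre n starts) F
        = pvB3 idx num pre n F (starts.drop k) := by
  intro d
  induction d with
  | zero =>
    intro k F hd
    have h1 : (starts.length : Int) ≤ (k : Int) := by omega
    rw [PySem.List.pyRange_one_eq_nil h1, List.foldl_nil,
        List.drop_eq_nil_of_le (by omega)]
    rfl
  | succ d ih =>
    intro k F hd
    have hk : k < starts.length := by omega
    have hcast : ((k : Nat) : Int) < (starts.length : Int) := by omega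
    rw [PySem.List.pyRange_one_cons hcast, List.foldl_cons]
    have hdrop : starts.drop k = starts[k] :: starts.drop (k + 1) :=
      List.drop_eq_getElem_cons hk
    have hgk : PySem.List.pyGetD starts ((k : Nat) : Int) 0 = starts[k] := by
      rw [PySem.List.pyGetD_natCast, List.getD_eq_getElem starts 0 hk]
    by_cases hlt : k + 1 < starts.length
    · -- not the last start
      have hcast1 : ((k : Nat) : Int) + 1 < (starts.length : Int) := by omega
      have hdrop1 : starts.drop (k + 1) = starts[k + 1] :: starts.drop (k + 2) :=
        List.drop_eq_getElem_cons hlt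
      have hgk1 : PySem.List.pyGetD starts (((k : Nat) : Int) + 1) 0 = starts[k + 1] := by
        have h1 : (((k : Nat) : Int) + 1) = ((k + 1 : Nat) : Int) := by push_cast; ring
        rw [h1, PySem.List.pyGetD_natCast, List.getD_eq_getElem starts 0 hlt]
      have hbody : pvB_body idx num pre n starts F ((k : Nat) : Int)
          = F ++ [if starts[k + 1] - starts[k] = 1 then
                (PySem.List.pyGetD idx starts[k] 0, PySem.List.pyGetD num starts[k] 0, 1)
              else (PySem.List.pyGetD idx starts[k] 0,
                PySem.List.pyGetD pre starts[k + 1] 0 - PySem.List.pyGetD pre starts[k] 0,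
                starts[k + 1] - starts[k])] := by
        unfold pvB_body
        dsimp only
        rw [if_pos hcast1, hgk, hgk1]
        split_ifs <;> rfl
      rw [hbody]
      have hnext : ((k : Nat) : Int) + 1 = ((k + 1 : Nat) : Int) := by push_cast; ring
      rw [hnext, ih (k + 1) _ (by omega), hdrop, hdrop1]
      rw [pvB3]
    · -- last start
      have hklast : k + 1 = starts.length := by omega
      have hcast1 : ¬ (((k : Nat) : Int) + 1 < (starts.length : Int)) := by omega
      have hdrop1 : starts.drop (k + 1) = [] := List.drop_eq_nil_of_le (by omega)
      have hbody : pvB_body idx num pre n starts F ((k : Nat) : Int)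
          = if n - starts[k] = 1 ∧ (F = [] ∨
                (PySem.List.pyGetD F (-1) (0, 0, 0)).1 ≠ PySem.List.pyGetD idx starts[k] 0) then
              F ++ [(PySem.List.pyGetD idx starts[k] 0, PySem.List.pyGetD num (-1) 0, 1)]
            else
              F ++ [(PySem.List.pyGetD idx starts[k] 0,
                PySem.List.pyGetD pre n 0 - PySem.List.pyGetD pre starts[k] 0, n - starts[k])] := by
        unfold pvB_body
        dsimp only
        have hendp : (if ((k : Nat) : Int) + 1 < (starts.length : Int)
            then PySem.List.pyGetD starts (((k : Nat) : Int) + 1) 0 else n) = n := if_neg hcast1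
        rw [if_neg hcast1, hendp, hgk]
      rw [hbody]
      have hnext : ((k : Nat) : Int) + 1 = ((k + 1 : Nat) : Int) := by push_cast; ring
      rw [hnext, ih (k + 1) _ (by omega), hdrop, hdrop1]
      show _ = pvB3 idx num pre n F [starts[k]]
      unfold pvB3
      rfl

-- pvB3 over the run starts = pvB2 over the runs (given a correct prefix-sum table)
theorem pvB3_eq_B2 (idx num pre : List Int)
    (hpre : ∀ a b : Nat, a ≤ b → b ≤ idx.length →
      PySem.List.pyGetD pre ((b : Nat) : Int) 0 - PySem.List.pyGetD pre ((a : Nat) : Int) 0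
        = (PySem.List.pyRange ((a : Nat) : Int) ((b : Nat) : Int) 1).foldl
            (fun t j => t + pvB_val num j) 0) :
    ∀ (d s : Nat) (F : List (Int × Int × Int)), idx.length - s ≤ d → s < idx.length →
      pvB3 idx num pre (idx.length : Int) F ((pvRunsFrom idx s).map (fun r => r.1))
        = pvB2 idx num F (pvRunsFrom idx s) := by
  intro d
  induction d with
  | zero => intro s F hd hs; omega
  | succ d ih =>
    intro s F hd hs
    have hL1 : 1 ≤ pvRunLen idx s := by
      unfold pvRunLen; split <;> omega
    have hLle : s + pvRunLen idx s ≤ idx.length := pvRunLen_le idx s hs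
    have hruns : pvRunsFrom idx s
        = ((s : Int), (pvRunLen idx s : Int)) :: pvRunsFrom idx (s + pvRunLen idx s) := by
      rw [pvRunsFrom, dif_pos hs]
    by_cases hend : s + pvRunLen idx s = idx.length
    · -- last run
      have hrest : pvRunsFrom idx (s + pvRunLen idx s) = [] := by
        rw [pvRunsFrom, dif_neg (by omega)]
      rw [hruns, hrest]
      simp only [List.map_cons, List.map_nil]
      rw [pvB2_singleton]
      have hn : (idx.length : Int) - (s : Int) = (pvRunLen idx s : Int) := by omega
      have hsum : PySem.List.pyGetD pre (idx.length : Int) 0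
            - PySem.List.pyGetD pre ((s : Nat) : Int) 0
          = (PySem.List.pyRange ((s : Nat) : Int)
               (((s : Nat) : Int) + (pvRunLen idx s : Int)) 1).foldl
              (fun t j => t + pvB_val num j) 0 := by
        have h1 : (((s : Nat) : Int) + (pvRunLen idx s : Int))
            = ((s + pvRunLen idx s : Nat) : Int) := by push_cast; ring
        rw [h1]
        have := hpre s (s + pvRunLen idx s) (by omega) (by omega)
        rw [hend] at this ⊢
        exact this
      rw [pvB3, hn, hsum]
    · -- not the last run
      have hrest : pvRunsFrom idx (s + pvRunLen idx s)
          = (((s + pvRunLen idx s : Nat) : Int),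
             (pvRunLen idx (s + pvRunLen idx s) : Int)) ::
              pvRunsFrom idx ((s + pvRunLen idx s) + pvRunLen idx (s + pvRunLen idx s)) := by
        rw [pvRunsFrom, dif_pos (by omega)]
      have hrestne : pvRunsFrom idx (s + pvRunLen idx s) ≠ [] := by
        rw [hrest]; simp
      have hmaprest : (pvRunsFrom idx (s + pvRunLen idx s)).map (fun r => r.1)
          = ((s + pvRunLen idx s : Nat) : Int) ::
              (pvRunsFrom idx ((s + pvRunLen idx s) + pvRunLen idx (s + pvRunLen idx s))).map
                (fun r => r.1) := by
        rw [hrest]; simp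
      rw [hruns, pvB2_cons idx num F _ _ hrestne]
      dsimp only
      rw [List.map_cons, hmaprest, pvB3, ← hmaprest]
      have hdiff : ((s + pvRunLen idx s : Nat) : Int) - ((s : Nat) : Int)
          = (pvRunLen idx s : Int) := by push_cast; ring
      have hemit : (if ((s + pvRunLen idx s : Nat) : Int) - ((s : Nat) : Int) = 1 then
            (PySem.List.pyGetD idx ((s : Nat) : Int) 0,
             PySem.List.pyGetD num ((s : Nat) : Int) 0, 1)
          else (PySem.List.pyGetD idx ((s : Nat) : Int) 0,
            PySem.List.pyGetD pre ((s + pvRunLen idx s : Nat) : Int) 0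
              - PySem.List.pyGetD pre ((s : Nat) : Int) 0,
            ((s + pvRunLen idx s : Nat) : Int) - ((s : Nat) : Int)))
          = pvB_emit idx num ((s : Nat) : Int) (pvRunLen idx s : Int) := by
        rw [hdiff]
        unfold pvB_emit
        split_ifs with h1
        · rfl
        · dsimp only
          rw [hpre s (s + pvRunLen idx s) (by omega) (by omega)]
          congr 2
      rw [hemit]
      exact ih (s + pvRunLen idx s) _ (by omega) (by omega)

theorem pvA_eq (idx num : List Int) (hne : idx ≠ [])
    (hlen : idx.length ≤ num.length) :
    find_consecutive_indexes_and_determine_numeric_value idx num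
      = pvB2 idx num [] (pvRunsFrom idx 0) := by
  have hA := pvLA idx num hlen (idx.length - 1) 0 0 [] [] (by omega) le_rfl
    (by omega) hne (Or.inl rfl) (fun t ht hte => by omega)
  rw [pvConsRep_self] at hA
  unfold find_consecutive_indexes_and_determine_numeric_value
  rw [PySem.List.pyGetD_zero]
  simpa using hA

theorem pvB_eq (idx num : List Int) (hne : idx ≠ []) :
    find_consecutive_indexes_and_determine_numeric_value_alt idx num
      = pvB2 idx num [] (pvRunsFrom idx 0) := by
  have hlen1 : 1 ≤ idx.length := List.length_pos_iff.mpr hne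
  unfold find_consecutive_indexes_and_determine_numeric_value_alt
  dsimp only
  -- starts = run starts
  have hstarts : (PySem.List.pyRange 0 (idx.length : Int) 1).foldl
      (fun s p => if p = 0 ∨
          PySem.List.pyGetD idx p 0 - p ≠ PySem.List.pyGetD idx (p - 1) 0 - (p - 1) then
        s ++ [p] else s) []
      = (pvRunsFrom idx 0).map (fun r => r.1) := by
    have h0 : (0 : Int) < (idx.length : Int) := by omega
    rw [PySem.List.pyRange_one_cons h0, List.foldl_cons]
    rw [if_pos (Or.inl rfl)]
    have hls := pvLS idx (idx.length - 1) 0 0 [] (by omega) le_rfl (by omega) hne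
      (fun t ht hte => by omega)
    simpa using hls
  rw [hstarts]
  -- the prefix-sum table is correct
  set vals : List Int := (PySem.List.pyRange 0 (idx.length : Int) 1).map
    (fun j => pvB_val num j) with hvals
  have hvlen : vals.length = idx.length := by
    rw [hvals, List.length_map, PySem.List.length_pyRange_one]
    omega
  have hpreList : vals.foldl (fun p v => p ++ [PySem.List.pyGetD p (-1) 0 + v]) [0]
      = (List.range (vals.length + 1)).map (fun k => (vals.take k).sum) := pvPre_eq vals
  have htake : ∀ b : Nat, b ≤ idx.length →
      vals.take b = (PySem.List.pyRange 0 ((b : Nat) : Int) 1).map (fun j => pvB_val num j) := by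
    intro b hb
    rw [hvals]
    rw [PySem.List.pyRange_one_append 0 ((b : Nat) : Int) (idx.length : Int) (by omega) (by omega)]
    rw [List.map_append]
    rw [List.take_append_of_le_length (by rw [List.length_map, PySem.List.length_pyRange_one]; omega)]
    rw [List.take_of_length_le (by rw [List.length_map, PySem.List.length_pyRange_one]; omega)]
  have hpre : ∀ a b : Nat, a ≤ b → b ≤ idx.length →
      PySem.List.pyGetD (vals.foldl (fun p v => p ++ [PySem.List.pyGetD p (-1) 0 + v]) [0])
          ((b : Nat) : Int) 0
        - PySem.List.pyGetD (vals.foldl (fun p v => p ++ [PySem.List.pyGetD p (-1) 0 + v]) [0])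
          ((a : Nat) : Int) 0
      = (PySem.List.pyRange ((a : Nat) : Int) ((b : Nat) : Int) 1).foldl
          (fun t j => t + pvB_val num j) 0 := by
    intro a b hab hb
    have hget : ∀ c : Nat, c ≤ idx.length →
        PySem.List.pyGetD (vals.foldl (fun p v => p ++ [PySem.List.pyGetD p (-1) 0 + v]) [0])
          ((c : Nat) : Int) 0 = (vals.take c).sum := by
      intro c hc
      rw [hpreList, PySem.List.pyGetD_natCast]
      rw [List.getD_eq_getElem _ 0 (by rw [List.length_map, List.length_range]; omega)]
      rw [List.getElem_map, List.getElem_range]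
    rw [hget a (by omega), hget b hb, htake a (by omega), htake b hb]
    rw [PySem.List.foldl_add]
    rw [PySem.List.pyRange_one_append 0 ((a : Nat) : Int) ((b : Nat) : Int) (by omega) (by omega)]
    rw [List.map_append, List.sum_append]
    ring
  -- indexed fold = pvB3 = pvB2
  have hfold := pvFoldB3 idx num
    (vals.foldl (fun p v => p ++ [PySem.List.pyGetD p (-1) 0 + v]) [0])
    (idx.length : Int) ((pvRunsFrom idx 0).map (fun r => r.1))
    ((pvRunsFrom idx 0).map (fun r => r.1)).length 0 [] (by omega)
  simp only [Nat.cast_zero, List.drop_zero] at hfold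
  rw [hfold]
  exact pvB3_eq_B2 idx num _ hpre (idx.length) 0 [] (by omega) (by omega)

-- ===== VERDICT (by name: the statement is the Claim_ definition above) =====
theorem find_consecutive_indexes_and_determine_numeric_value_spec : Claim_equal_find_consecutive_indexes_and_determine_numeric_value := by
  intro indexes numbers _hdom hpre
  obtain ⟨hne, hlen⟩ := hpre
  unfold Spec_find_consecutive_indexes_and_determine_numeric_value
  rw [pvA_eq indexes numbers hne hlen, pvB_eq indexes numbers hne]
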